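-- pv_equiv track=rewrite | github.com/tahentx/gridshift | metis.py | tweener
-- ===== SOURCE A (Python) =====
-- def tweener(lower,upper):
--     values = range(lower,upper + 1)
--     output = []
--     for x in values:
--         if x % 2 == 0:
--             output.append(x)
--         elif x % 7 == 0:
--             output.append(x)
--         else:
--             pass
--     return output
-- ===== SOURCE B (Python) =====
-- def tweener(lower, upper):
--     evens = range(lower + lower % 2, upper + 1, 2)
--     sevens = range(lower + (-lower) % 7, upper + 1, 7)
--     return sorted(set(evens) | set(sevens))
-- ===== Notes on version B (the rewrite author's own statement) =====
-- stated objective: alternative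
-- what changed: Instead of scanning every integer in [lower, upper] and testing divisibility, B directly generates the two arithmetic progressions (multiples of 2 and of 7) with stepped ranges, unions them as a set to drop the multiples-of-14 overlap, and returns them sorted.
import Mathlib
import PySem

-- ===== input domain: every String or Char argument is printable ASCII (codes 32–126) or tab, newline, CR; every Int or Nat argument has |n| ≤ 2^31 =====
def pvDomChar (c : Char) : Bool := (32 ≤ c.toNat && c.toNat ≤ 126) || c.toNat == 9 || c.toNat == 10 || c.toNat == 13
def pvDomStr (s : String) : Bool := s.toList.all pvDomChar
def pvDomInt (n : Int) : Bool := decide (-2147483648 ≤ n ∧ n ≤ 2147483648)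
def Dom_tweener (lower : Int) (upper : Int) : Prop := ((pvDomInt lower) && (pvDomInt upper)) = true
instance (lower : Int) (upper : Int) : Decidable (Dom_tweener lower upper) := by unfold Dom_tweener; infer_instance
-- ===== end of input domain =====

-- B replaces A's scan-and-test over every integer in [lower, upper] by directly generating
-- the two arithmetic progressions (step-2 and step-7 ranges), uniting them as a set and sorting.

-- ===== PORT A =====
def tweener (lower : Int) (upper : Int) : List Int :=
  (PySem.List.pyRange lower (upper + 1) 1).foldl
    (fun output x =>
      if PySem.Int.mod x 2 == 0 then output ++ [x]
      else if PySem.Int.mod x 7 == 0 then output ++ [x]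
      else output) []

-- ===== PORT B =====
def tweener_alt (lower : Int) (upper : Int) : List Int :=
  let evens := PySem.List.pyRange (lower + PySem.Int.mod lower 2) (upper + 1) 2
  let sevens := PySem.List.pyRange (lower + PySem.Int.mod (-lower) 7) (upper + 1) 7
  PySem.List.sorted (PySem.Set.union (PySem.Set.ofList evens) (PySem.Set.ofList sevens)) (fun x => x)

-- ===== PRECONDITION & SPEC =====
def Spec_tweener (lower : Int) (upper : Int) (out : List Int) : Prop := out = tweener_alt lower upper
instance (lower : Int) (upper : Int) (out : List Int) : Decidable (Spec_tweener lower upper out) := by unfold Spec_tweener; infer_instance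

-- ===== CLAIM (what is proved, stated in full; the proofs are below) =====
def Claim_equal_tweener : Prop := ∀ (lower : Int) (upper : Int), Dom_tweener lower upper → Spec_tweener lower upper (tweener lower upper)

-- ===== LEMMAS AND PROOFS =====

-- A is the filter of the step-1 range by divisibility-by-2-or-7.
theorem tweener_eq_filter (lower upper : Int) :
    tweener lower upper =
      (PySem.List.pyRange lower (upper + 1) 1).filter
        (fun x => PySem.Int.mod x 2 == 0 || PySem.Int.mod x 7 == 0) := by
  unfold tweener
  have hfun : (fun (output : List Int) x =>
      if PySem.Int.mod x 2 == 0 then output ++ [x]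
      else if PySem.Int.mod x 7 == 0 then output ++ [x]
      else output) =
      (fun (output : List Int) x =>
        if (PySem.Int.mod x 2 == 0 || PySem.Int.mod x 7 == 0) then output ++ [x] else output) := by
    funext o x
    simp only [beq_iff_eq, PySem.Int.mod_eq_zero_iff_dvd]
    by_cases h2 : (2:Int) ∣ x <;> by_cases h7 : (7:Int) ∣ x <;> simp [h2, h7]
  rw [hfun, PySem.List.foldl_append_if_eq_filter]
  simp

-- membership in A's filtered list
theorem mem_filter_char (lower upper x : Int) :
    x ∈ (PySem.List.pyRange lower (upper + 1) 1).filter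
        (fun x => PySem.Int.mod x 2 == 0 || PySem.Int.mod x 7 == 0) ↔
      lower ≤ x ∧ x ≤ upper ∧ (2 ∣ x ∨ 7 ∣ x) := by
  simp only [List.mem_filter, PySem.List.mem_pyRange_one, Bool.or_eq_true, beq_iff_eq,
    PySem.Int.mod_eq_zero_iff_dvd]
  omega

-- membership in B's union set
theorem mem_union_char (lower upper x : Int) :
    x ∈ PySem.Set.union
        (PySem.Set.ofList (PySem.List.pyRange (lower + PySem.Int.mod lower 2) (upper + 1) 2))
        (PySem.Set.ofList (PySem.List.pyRange (lower + PySem.Int.mod (-lower) 7) (upper + 1) 7)) ↔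
      lower ≤ x ∧ x ≤ upper ∧ (2 ∣ x ∨ 7 ∣ x) := by
  rw [PySem.Set.mem_union]
  rw [PySem.Set.mem_ofList, PySem.Set.mem_ofList]
  rw [PySem.List.mem_pyRange_iff_of_pos (by norm_num), PySem.List.mem_pyRange_iff_of_pos (by norm_num)]
  have h2 : PySem.Int.mod lower 2 = lower % 2 := PySem.Int.mod_eq_emod_of_pos (by norm_num)
  have h7 : PySem.Int.mod (-lower) 7 = (-lower) % 7 := PySem.Int.mod_eq_emod_of_pos (by norm_num)
  rw [h2, h7]
  omega

theorem tweener_alt_eq (lower upper : Int) :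
    tweener_alt lower upper = tweener lower upper := by
  unfold tweener_alt
  rw [tweener_eq_filter]
  apply PySem.List.sorted_eq_of_perm_of_pairwise_lt
  · rw [List.perm_ext_iff_of_nodup
      (List.Nodup.filter _ (PySem.List.nodup_pyRange_one lower (upper + 1)))
      (PySem.Set.nodup_union _ _ (PySem.Set.nodup_ofList _))]
    intro a
    rw [mem_filter_char, mem_union_char]
  · exact List.Pairwise.filter _ (PySem.List.pairwise_lt_pyRange_one lower (upper + 1))

-- ===== VERDICT (by name: the statement is the Claim_ definition above) =====
theorem tweener_spec : Claim_equal_tweener := by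
  intro lower upper _
  unfold Spec_tweener
  exact (tweener_alt_eq lower upper).symm
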